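-- pv_equiv track=rewrite | github.com/pat3hall/pat-cloud-ml-repo | machine-learning-training/acloudguru-machine-learning-aws-deep-dive-course/demos/TransformHotelBookingFlowCode.py | dedupe_columns
-- ===== SOURCE A (Python) =====
-- from collections import Counter, namedtuple
--
-- def dedupe_columns(cols):
--     """Dedupe and rename the column names after applying join operators. Rules:
--         * First, append "_0", "_1" to dedupe and mark as renamed.
--         * If the original df already takes the name, we will append more "_dup" as suffix til it's unique.
--     """
--     # spark by default is not case sensitive, so we will convert the column names to lower case
--     lowered_cols = [col.lower() for col in cols]
--     col_to_count = Counter(lowered_cols)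
--     duplicate_col_to_count = {col: col_to_count[col] for col in col_to_count if col_to_count[col] != 1}
--     for i in range(len(lowered_cols)):
--         col = lowered_cols[i]
--         if col in duplicate_col_to_count:
--             idx = col_to_count[col] - duplicate_col_to_count[col]
--             new_col_name = f"{col}_{str(idx)}"
--             while new_col_name in col_to_count:
--                 new_col_name += "_dup"
--             cols[i] = new_col_name.replace(col, cols[i], 1)
--             duplicate_col_to_count[col] -= 1
--     return cols
-- ===== SOURCE B (Python) =====
-- def dedupe_columns(cols):
--     """Dedupe and rename duplicate column names: group positions by lowered name,
--     then rename each duplicated group with _0, _1, ... suffixes (plus _dup while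
--     the candidate collides with an original lowered name). Mutates cols in place."""
--     positions = {}
--     for i, c in enumerate(cols):
--         positions.setdefault(c.lower(), []).append(i)
--     names = set(positions)
--     for name, idxs in positions.items():
--         if len(idxs) > 1:
--             for k, pos in enumerate(idxs):
--                 cand = f"{name}_{k}"
--                 while cand in names:
--                     cand += "_dup"
--                 cols[pos] = cols[pos] + cand[len(name):]
--     return cols
-- ===== Notes on version B (the rewrite author's own statement) =====
-- stated objective: alternative
-- what changed: B builds an index dict mapping each lowered name to the list of its positions in one pass, then renames duplicated groups name by name (suffix = rank within the group), instead of A's single indexed pass that decrements a per-name Counter of remaining occurrences and patches via str.replace.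
import Mathlib
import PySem

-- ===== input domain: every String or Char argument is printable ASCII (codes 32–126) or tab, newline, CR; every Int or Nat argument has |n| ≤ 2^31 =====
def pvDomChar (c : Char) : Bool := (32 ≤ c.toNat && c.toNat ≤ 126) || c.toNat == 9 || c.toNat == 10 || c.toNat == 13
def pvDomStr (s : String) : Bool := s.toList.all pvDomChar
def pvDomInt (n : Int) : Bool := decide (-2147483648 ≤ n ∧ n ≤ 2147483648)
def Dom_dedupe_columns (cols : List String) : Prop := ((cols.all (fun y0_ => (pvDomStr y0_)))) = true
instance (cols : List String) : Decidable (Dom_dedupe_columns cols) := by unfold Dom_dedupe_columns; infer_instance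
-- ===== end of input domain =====

-- B regroups the work by column name (an index dict of positions per lowered name) instead of
-- A's per-index pass with a decrementing Counter; same return value, and like A it mutates the
-- Python list in place (the equivalence proved here is about the return value).

-- ===== PORT A =====
-- hand port of Python's s.replace(old, new, 1) (count = 1): replace the first occurrence only;
-- exact: Python finds the first index of `old` (0 for the empty string) and splices `new` in.
def pvReplace1 (s old new : String) : String :=
  let i := PySem.Str.find s old
  if i = -1 then s
  else String.ofList (s.toList.take i.toNat ++ new.toList ++ s.toList.drop (i.toNat + old.toList.length))

-- the `while new_col_name in col_to_count: new_col_name += "_dup"` loop; the fuel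
-- `cnt.size + 1` is sufficient: the candidates are pairwise distinct (strictly growing),
-- so at most `cnt.size` of them can be keys of `cnt`.
def pvDupLoopA (cnt : PySem.Dict String Int) : Nat → String → String
  | 0, name => name
  | fuel+1, name =>
      if cnt.contains name then pvDupLoopA cnt fuel (name ++ "_dup") else name

-- loop body of A's `for i in range(len(lowered_cols))`, state = (cols, duplicate_col_to_count)
def pvStepA (cnt : PySem.Dict String Int) (lowered : List String)
    (st : List String × PySem.Dict String Int) (i : Nat) :
    List String × PySem.Dict String Int :=
  let col := PySem.List.pyGetD lowered (i : Int) ""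
  if st.2.contains col then
    let idx := cnt.getD col 0 - st.2.getD col 0
    let new_col_name := pvDupLoopA cnt (cnt.size + 1) (col ++ "_" ++ PySem.Int.toStr idx)
    (PySem.List.pySetD st.1 (i : Int) (pvReplace1 new_col_name col (PySem.List.pyGetD st.1 (i : Int) "")),
     st.2.insert col (st.2.getD col 0 - 1))
  else st

def dedupe_columns (cols : List String) : List String :=
  let lowered_cols := cols.map PySem.Str.lower
  let col_to_count := PySem.Dict.counter lowered_cols
  let duplicate0 := col_to_count.keys.foldl
    (fun d col => if col_to_count.getD col 0 ≠ 1 then d.insert col (col_to_count.getD col 0) else d)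
    PySem.Dict.empty
  ((List.range lowered_cols.length).foldl (pvStepA col_to_count lowered_cols) (cols, duplicate0)).1

-- ===== PORT B =====
-- the `while cand in names: cand += "_dup"` loop of B; fuel sufficient as for pvDupLoopA
def pvDupLoopB (names : PySem.Set String) : Nat → String → String
  | 0, cand => cand
  | fuel+1, cand =>
      if PySem.Set.contains names cand then pvDupLoopB names fuel (cand ++ "_dup") else cand

-- body of B's inner `for k, pos in enumerate(idxs)` loop
def pvInnerStepB (names : PySem.Set String) (name : String)
    (cs : List String) (kp : Int × Int) : List String :=
  let cand := pvDupLoopB names (names.length + 1) (name ++ "_" ++ PySem.Int.toStr kp.1)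
  PySem.List.pySetD cs kp.2
    (PySem.List.pyGetD cs kp.2 "" ++ PySem.Str.slice cand (some (PySem.Str.len name)) none)

-- body of B's outer `for name, idxs in positions.items()` loop
def pvGroupB (names : PySem.Set String) (cs : List String) (pr : String × List Int) : List String :=
  if 1 < pr.2.length then (PySem.List.enumerate pr.2 0).foldl (pvInnerStepB names pr.1) cs
  else cs

def dedupe_columns_alt (cols : List String) : List String :=
  let positions := (PySem.List.enumerate cols 0).foldl
    (fun d p => d.modify (PySem.Str.lower p.2) [] (fun l => l ++ [p.1])) PySem.Dict.empty
  let names := PySem.Set.ofList positions.keys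
  positions.items.foldl (pvGroupB names) cols

-- ===== PRECONDITION & SPEC =====
def Spec_dedupe_columns (cols : List String) (out : List String) : Prop := out = dedupe_columns_alt cols
instance (cols : List String) (out : List String) : Decidable (Spec_dedupe_columns cols out) := by unfold Spec_dedupe_columns; infer_instance

-- ===== CLAIM (what is proved, stated in full; the proofs are below) =====
def Claim_equal_dedupe_columns : Prop := ∀ (cols : List String), Dom_dedupe_columns cols → Spec_dedupe_columns cols (dedupe_columns cols)

-- ===== LEMMAS AND PROOFS =====

-- the common "append _dup while the candidate is an original lowered name" loop, phrased on the list
def pvLoopL (low : List String) : Nat → String → String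
  | 0, c => c
  | fuel+1, c => if c ∈ low then pvLoopL low fuel (c ++ "_dup") else c

def pvCand (low : List String) (c : String) (k : Int) : String :=
  pvLoopL low ((PySem.Set.ofList low).length + 1) (c ++ "_" ++ PySem.Int.toStr k)

def pvTail (low : List String) (c : String) (k : Int) : String :=
  String.ofList ((pvCand low c k).toList.drop c.toList.length)

-- the common per-position specification of both programs
def pvOutAt (cols low : List String) (j : Nat) : String :=
  if low.count (low.getD j "") = 1 then cols.getD j ""
  else cols.getD j "" ++ pvTail low (low.getD j "") (((low.take j).count (low.getD j "") : Int))

def pvSpecL (cols : List String) : List String :=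
  (List.range cols.length).map (pvOutAt cols (cols.map PySem.Str.lower))

-- occurrence positions of `name` in `l`, starting at index `s` (B's positions dict, per name)
def pvOcc : List String → String → Int → List Int
  | [], _, _ => []
  | c :: l, name, s => if c = name then s :: pvOcc l name (s+1) else pvOcc l name (s+1)

lemma pvDupLoopA_eq (low : List String) :
    ∀ (f : Nat) (s : String), pvDupLoopA (PySem.Dict.counter low) f s = pvLoopL low f s := by
  intro f
  induction f with
  | zero => intro s; rfl
  | succ f ih =>
      intro s
      simp only [pvDupLoopA, pvLoopL, PySem.Dict.contains_counter, List.contains_eq_mem,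
        decide_eq_true_eq]
      split <;> simp [ih]

lemma pvDupLoopB_eq (low : List String) :
    ∀ (f : Nat) (s : String), pvDupLoopB (PySem.Set.ofList low) f s = pvLoopL low f s := by
  intro f
  induction f with
  | zero => intro s; rfl
  | succ f ih =>
      intro s
      have hc : ∀ c : String, PySem.Set.contains (PySem.Set.ofList low) c = decide (c ∈ low) := by
        intro c
        simp [PySem.Set.contains, List.contains_eq_mem, PySem.Set.mem_ofList]
      simp only [pvDupLoopB, pvLoopL, hc, decide_eq_true_eq]
      split <;> simp [ih]

lemma pvLoopL_append (low : List String) :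
    ∀ (f : Nat) (s : String), ∃ t, pvLoopL low f s = s ++ t := by
  intro f
  induction f with
  | zero => intro s; exact ⟨"", by simp [pvLoopL]⟩
  | succ f ih =>
      intro s
      by_cases h : s ∈ low
      · obtain ⟨t, ht⟩ := ih (s ++ "_dup")
        exact ⟨"_dup" ++ t, by simp [pvLoopL, h, ht, String.append_assoc]⟩
      · exact ⟨"", by simp [pvLoopL, h]⟩

lemma pvFind_prefix (w c : List Char) (h : c <+: w) : PySem.Chars.find w c = 0 := by
  cases w with
  | nil =>
      have : c = [] := List.prefix_nil.mp h
      simp [PySem.Chars.find, PySem.Chars.find.go, this]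
  | cons a w =>
      have : c.isPrefixOf (a :: w) = true := List.isPrefixOf_iff_prefix.mpr h
      simp [PySem.Chars.find, PySem.Chars.find.go, this]

lemma pvReplace1_prefix (c t orig : String) : pvReplace1 (c ++ t) c orig = orig ++ t := by
  have hfind : PySem.Str.find (c ++ t) c = 0 := by
    show PySem.Chars.find (c ++ t).toList c.toList = 0
    exact pvFind_prefix _ _ (by rw [String.toList_append]; exact List.prefix_append _ _)
  apply String.toList_inj.mp
  simp only [pvReplace1, hfind]
  norm_num

lemma pvSlice_prefix (c t : String) :
    PySem.Str.slice (c ++ t) (some (PySem.Str.len c)) none = t := by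
  apply String.toList_inj.mp
  rw [PySem.Str.toList_slice]
  show PySem.List.slice (c ++ t).toList (some (PySem.Str.len c)) none = t.toList
  rw [PySem.List.slice_from _ (by simp [PySem.Str.len])]
  simp [PySem.Str.len, String.toList_append]

lemma pvFoldl_insert_if_get (v : String → Int) (P : String → Prop) [DecidablePred P] :
    ∀ (l : List String) (d0 : PySem.Dict String Int) (c : String),
    (l.foldl (fun d col => if P col then d.insert col (v col) else d) d0).get? c
      = if c ∈ l ∧ P c then some (v c) else d0.get? c := by
  intro l
  induction l with
  | nil => intro d0 c; simp
  | cons a l ih =>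
      intro d0 c
      rw [List.foldl_cons, ih]
      by_cases hl : c ∈ l ∧ P c
      · simp [hl]
      · rw [if_neg hl]
        by_cases hac : a = c
        · subst hac
          by_cases hP : P a
          · simp [hP, PySem.Dict.get?_insert_self]
          · simp [hP]
        · have h3 : (c ∈ a :: l ∧ P c) ↔ (c ∈ l ∧ P c) := by
            constructor
            · rintro ⟨hm, hp⟩
              rcases List.mem_cons.mp hm with h | h
              · exact absurd h.symm hac
              · exact ⟨h, hp⟩
            · rintro ⟨hm, hp⟩; exact ⟨List.mem_cons_of_mem _ hm, hp⟩
          rw [if_neg (fun h => hl (h3.mp h))]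
          by_cases hP : P a
          · rw [if_pos hP, PySem.Dict.get?_insert_of_ne _ _ (Ne.symm hac)]
          · rw [if_neg hP]

lemma pvItems_aux :
    ∀ (l : List (String × List Int)), (l.map Prod.fst).Nodup →
    (l.map Prod.fst).map (fun k => (k, (PySem.Dict.mk l).getD k [])) = l := by
  intro l
  induction l with
  | nil => intro _; rfl
  | cons a rest ih =>
      intro h
      obtain ⟨k0, v0⟩ := a
      rw [List.map_cons] at h
      obtain ⟨hk, hrest⟩ := List.nodup_cons.mp h
      rw [List.map_cons, List.map_cons]
      have h1 : (PySem.Dict.mk ((k0, v0) :: rest)).getD k0 [] = v0 := by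
        simp [PySem.Dict.getD, PySem.Dict.get?_mk_cons]
      rw [h1]
      have h2 : (rest.map Prod.fst).map (fun k => (k, (PySem.Dict.mk ((k0, v0) :: rest)).getD k []))
          = (rest.map Prod.fst).map (fun k => (k, (PySem.Dict.mk rest).getD k [])) := by
        apply List.map_congr_left
        intro k hkmem
        have hne : (k0 == k) = false := by
          rcases h' : k0 == k with _ | _
          · rfl
          · exact absurd (by rw [eq_of_beq h']; exact hkmem) hk
        simp [PySem.Dict.getD, PySem.Dict.get?_mk_cons, hne]
      rw [h2, ih hrest]

lemma pvItems_eq (d : PySem.Dict String (List Int)) (h : d.keys.Nodup) :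
    d.items = d.keys.map (fun k => (k, d.getD k [])) := by
  rcases d with ⟨l⟩
  exact (pvItems_aux l h).symm

lemma pvOcc_filter_enum (name : String) :
    ∀ (cols : List String) (s : Int),
    ((PySem.List.enumerate cols s).filter (fun p => PySem.Str.lower p.2 == name)).map (·.1)
      = pvOcc (cols.map PySem.Str.lower) name s := by
  intro cols
  induction cols with
  | nil => intro s; rfl
  | cons c l ih =>
      intro s
      rw [PySem.List.enumerate_cons, List.map_cons, List.filter_cons]
      by_cases hc : PySem.Str.lower c = name
      · simp [pvOcc, hc, ih]
      · simp [pvOcc, hc, ih]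

lemma pvOcc_length (name : String) :
    ∀ (l : List String) (s : Int), (pvOcc l name s).length = l.count name := by
  intro l
  induction l with
  | nil => intro s; rfl
  | cons c l ih =>
      intro s
      by_cases hc : c = name
      · simp [pvOcc, hc, ih]
      · simp [pvOcc, hc, ih]

lemma pvOcc_mem (name : String) :
    ∀ (l : List String) (s x : Int),
    x ∈ pvOcc l name s ↔ ∃ j : Nat, j < l.length ∧ x = s + j ∧ l.getD j "" = name := by
  intro l
  induction l with
  | nil => intro s x; simp [pvOcc]
  | cons c l ih =>
      intro s x
      constructor
      · intro hx
        by_cases hc : c = name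
        · rw [pvOcc, if_pos hc] at hx
          rcases List.mem_cons.mp hx with h | h
          · exact ⟨0, by simp [h, hc]⟩
          · obtain ⟨j, hj, hxe, hg⟩ := (ih (s+1) x).mp h
            exact ⟨j + 1, by simp only [List.length_cons] at *; omega, by push_cast; omega, by simpa using hg⟩
        · rw [pvOcc, if_neg hc] at hx
          obtain ⟨j, hj, hxe, hg⟩ := (ih (s+1) x).mp hx
          exact ⟨j + 1, by simp only [List.length_cons] at *; omega, by push_cast; omega, by simpa using hg⟩
      · rintro ⟨j, hj, hxe, hg⟩
        cases j with
        | zero =>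
            simp only [List.getD_cons_zero] at hg
            rw [pvOcc, if_pos hg]
            simp [hxe]
        | succ j =>
            simp only [List.getD_cons_succ] at hg
            have hx' : x ∈ pvOcc l name (s+1) := by
              apply (ih (s+1) x).mpr
              exact ⟨j, by simp only [List.length_cons] at *; omega, by push_cast at hxe ⊢; omega, hg⟩
            by_cases hc : c = name
            · rw [pvOcc, if_pos hc]; exact List.mem_cons_of_mem _ hx'
            · rw [pvOcc, if_neg hc]; exact hx'

lemma pvOcc_get (name : String) :
    ∀ (l : List String) (s : Int) (m : Nat), m < (pvOcc l name s).length →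
    ∃ j : Nat, j < l.length ∧ (pvOcc l name s)[m]? = some (s + j) ∧
      l.getD j "" = name ∧ (l.take j).count name = m := by
  intro l
  induction l with
  | nil => intro s m hm; simp [pvOcc] at hm
  | cons c l ih =>
      intro s m hm
      by_cases hc : c = name
      · rw [pvOcc, if_pos hc] at hm ⊢
        cases m with
        | zero => exact ⟨0, by simp, by simp, by simp [hc], by simp⟩
        | succ m =>
            simp only [List.length_cons] at hm
            obtain ⟨j, hj, hget, hgd, hcnt⟩ := ih (s+1) m (by omega)
            refine ⟨j + 1, by simp only [List.length_cons] at *; omega, ?_, by simpa using hgd, ?_⟩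
            · rw [List.getElem?_cons_succ, hget]
              congr 1; push_cast; ring
            · rw [List.take_succ_cons, List.count_cons, hcnt]
              simp [hc.symm]
      · rw [pvOcc, if_neg hc] at hm ⊢
        obtain ⟨j, hj, hget, hgd, hcnt⟩ := ih (s+1) m hm
        refine ⟨j + 1, by simp only [List.length_cons] at *; omega, ?_, by simpa using hgd, ?_⟩
        · rw [hget]; congr 1; push_cast; ring
        · rw [List.take_succ_cons, List.count_cons, hcnt]
          have h4 : (c == name) = false := by simpa using hc
          simp [h4]

lemma pvOcc_ge (name : String) :
    ∀ (l : List String) (s x : Int), x ∈ pvOcc l name s → s ≤ x := by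
  intro l s x hx
  obtain ⟨j, _, hxe, _⟩ := (pvOcc_mem name l s x).mp hx
  omega

lemma pvOcc_nodup (name : String) :
    ∀ (l : List String) (s : Int), (pvOcc l name s).Nodup := by
  intro l
  induction l with
  | nil => intro s; simp [pvOcc]
  | cons c l ih =>
      intro s
      by_cases hc : c = name
      · rw [pvOcc, if_pos hc]
        refine List.nodup_cons.mpr ⟨fun hmem => ?_, ih (s+1)⟩
        have := pvOcc_ge name l (s+1) s hmem
        omega
      · rw [pvOcc, if_neg hc]; exact ih (s+1)

lemma pvBinner (cols low : List String) (name : String) (hc : low.count name ≠ 1) :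
    ∀ (ps : List (Int × Int)) (cs : List String),
    cs.length = cols.length →
    (∀ p ∈ ps, ∃ j : Nat, j < cols.length ∧ p.2 = (j : Int) ∧
        low.getD j "" = name ∧ (low.take j).count name = p.1.toNat ∧ 0 ≤ p.1 ∧
        cs.getD j "" = cols.getD j "") →
    (ps.map (·.2)).Nodup →
    ((ps.foldl (pvInnerStepB (PySem.Set.ofList low) name) cs).length = cols.length ∧
     ∀ j : Nat, j < cols.length →
      (ps.foldl (pvInnerStepB (PySem.Set.ofList low) name) cs).getD j ""
        = if (∃ p ∈ ps, p.2 = (j : Int)) then pvOutAt cols low j else cs.getD j "") := by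
  intro ps
  induction ps with
  | nil =>
      intro cs hlen _ _
      refine ⟨hlen, fun j hj => ?_⟩
      simp
  | cons p ps ih =>
      intro cs hlen hyp hnd
      obtain ⟨j0, hj0, hp2, hgd, hcnt, hp1, hcsj⟩ := hyp p List.mem_cons_self
      have hstep : pvInnerStepB (PySem.Set.ofList low) name cs p
          = cs.set j0 (pvOutAt cols low j0) := by
        simp only [pvInnerStepB]
        rw [pvDupLoopB_eq low]
        obtain ⟨t, ht⟩ := pvLoopL_append low ((PySem.Set.ofList low).length + 1)
          (name ++ "_" ++ PySem.Int.toStr p.1)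
        have hcand : pvCand low name p.1 = name ++ ("_" ++ PySem.Int.toStr p.1 ++ t) := by
          rw [pvCand, ht]
          simp [String.append_assoc]
        have hcand' : pvLoopL low ((PySem.Set.ofList low).length + 1)
            (name ++ "_" ++ PySem.Int.toStr p.1) = pvCand low name p.1 := rfl
        rw [hcand', hcand, pvSlice_prefix, hp2, PySem.List.pyGetD_natCast,
          PySem.List.pySetD_natCast, hcsj]
        congr 1
        rw [pvOutAt, if_neg (by rw [hgd]; exact hc), hgd]
        congr 1
        have hk : (((low.take j0).count name : Int)) = p.1 := by
          rw [hcnt]; exact Int.toNat_of_nonneg hp1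
        rw [pvTail, hk, hcand, String.toList_append, List.drop_left, String.ofList_toList]
      rw [List.foldl_cons, hstep]
      have hnd2 : (p.2 :: ps.map (·.2)).Nodup := by simpa using hnd
      obtain ⟨hh2, ht2⟩ := List.nodup_cons.mp hnd2
      obtain ⟨hlen2, hget⟩ := ih (cs.set j0 (pvOutAt cols low j0))
        (by simp [hlen])
        (by
          intro q hq
          obtain ⟨j, hj, hq2, hgd', hcnt', hq1, hcsj'⟩ := hyp q (List.mem_cons_of_mem _ hq)
          refine ⟨j, hj, hq2, hgd', hcnt', hq1, ?_⟩
          have hne : j0 ≠ j := by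
            intro h
            apply hh2
            have : q.2 ∈ ps.map (·.2) := List.mem_map.mpr ⟨q, hq, rfl⟩
            rw [hp2, h, ← hq2]
            exact this
          rw [List.getD_eq_getElem?_getD, List.getElem?_set_ne hne,
            ← List.getD_eq_getElem?_getD, hcsj'])
        ht2
      refine ⟨hlen2, fun j hj => ?_⟩
      rw [hget j hj]
      by_cases hmem : ∃ q ∈ ps, q.2 = (j : Int)
      · rw [if_pos hmem]
        obtain ⟨q, hq, hq2⟩ := hmem
        rw [if_pos ⟨q, List.mem_cons_of_mem _ hq, hq2⟩]
      · rw [if_neg hmem]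
        by_cases hpj : p.2 = (j : Int)
        · have hjj : j0 = j := by
            rw [hp2] at hpj
            exact_mod_cast hpj
          subst hjj
          rw [List.getD_eq_getElem?_getD, List.getElem?_set_self (by omega : j0 < cs.length),
            Option.getD_some, if_pos ⟨p, List.mem_cons_self, hpj⟩]
        · have hne : j0 ≠ j := by
            intro h
            exact hpj (by rw [hp2, h])
          rw [List.getD_eq_getElem?_getD, List.getElem?_set_ne hne, ← List.getD_eq_getElem?_getD]
          rw [if_neg ?_]
          rintro ⟨q, hq, hq2⟩
          rcases List.mem_cons.mp hq with h | h
          · exact hpj (h ▸ hq2)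
          · exact hmem ⟨q, h, hq2⟩

lemma pvBouter (cols low : List String) (hlen : low.length = cols.length) :
    ∀ (ns : List String), ns.Nodup →
    ∀ cs : List String, cs.length = cols.length →
    (∀ j : Nat, j < cols.length →
      cs.getD j "" = if low.getD j "" ∈ ns then cols.getD j "" else pvOutAt cols low j) →
    ((ns.foldl (fun cs name => pvGroupB (PySem.Set.ofList low) cs (name, pvOcc low name 0)) cs).length = cols.length ∧
     ∀ j : Nat, j < cols.length →
      (ns.foldl (fun cs name => pvGroupB (PySem.Set.ofList low) cs (name, pvOcc low name 0)) cs).getD j ""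
        = pvOutAt cols low j) := by
  intro ns
  induction ns with
  | nil =>
      intro _ cs hl hyp
      refine ⟨hl, fun j hj => ?_⟩
      have := hyp j hj
      simpa using this
  | cons name ns ih =>
      intro hnd cs hl hyp
      obtain ⟨hhead, htail⟩ := List.nodup_cons.mp hnd
      rw [List.foldl_cons]
      by_cases hbig : 1 < (pvOcc low name 0).length
      · have hc : low.count name ≠ 1 := by
          have := pvOcc_length name low 0
          omega
        have hocc := hbig
        rw [show pvGroupB (PySem.Set.ofList low) cs (name, pvOcc low name 0)
            = (PySem.List.enumerate (pvOcc low name 0) 0).foldl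
                (pvInnerStepB (PySem.Set.ofList low) name) cs from by
          rw [pvGroupB, if_pos hocc]]
        obtain ⟨hlen1, hget1⟩ := pvBinner cols low name hc
          (PySem.List.enumerate (pvOcc low name 0) 0) cs hl
          (by
            intro p hp
            obtain ⟨k, hk, hpk⟩ := (PySem.List.mem_enumerate_iff _ _ _).mp hp
            obtain ⟨j, hj, hget?, hgd, hcnt⟩ := pvOcc_get name low 0 k hk
            have hjc : j < cols.length := by omega
            have helem : (pvOcc low name 0)[k] = (j : Int) := by
              have := List.getElem?_eq_getElem hk
              rw [this] at hget?
              have := Option.some.inj hget?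
              omega
            refine ⟨j, hjc, ?_, hgd, ?_, ?_, ?_⟩
            · rw [hpk]; exact helem
            · rw [hpk]; simpa using hcnt.symm ▸ (by simp [hcnt] : ((low.take j).count name : Int).toNat = k) ▸ rfl
            · rw [hpk]; simp
            · rw [hyp j hjc, if_pos (by rw [hgd]; exact List.mem_cons_self)])
          (by rw [PySem.List.map_snd_enumerate]; exact pvOcc_nodup name low 0)
        apply ih htail _ hlen1
        intro j hj
        rw [hget1 j hj]
        have hiff : (∃ p ∈ PySem.List.enumerate (pvOcc low name 0) 0, p.2 = (j : Int))
            ↔ low.getD j "" = name := by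
          constructor
          · rintro ⟨p, hp, hp2⟩
            have : (j : Int) ∈ (PySem.List.enumerate (pvOcc low name 0) 0).map (·.2) :=
              List.mem_map.mpr ⟨p, hp, hp2⟩
            rw [PySem.List.map_snd_enumerate] at this
            obtain ⟨j', hj', hje, hgd'⟩ := (pvOcc_mem name low 0 _).mp this
            have : j' = j := by omega
            rw [← this]; exact hgd'
          · intro hgd
            have hmem : (j : Int) ∈ pvOcc low name 0 := by
              apply (pvOcc_mem name low 0 _).mpr
              exact ⟨j, by omega, by simp, hgd⟩
            rw [← PySem.List.map_snd_enumerate (pvOcc low name 0) 0] at hmem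
            obtain ⟨p, hp, hp2⟩ := List.mem_map.mp hmem
            exact ⟨p, hp, hp2⟩
        by_cases hn : low.getD j "" ∈ ns
        · have hne : low.getD j "" ≠ name := fun h => hhead (h ▸ hn)
          rw [if_neg (fun h => hne (hiff.mp h)), hyp j hj,
            if_pos (List.mem_cons_of_mem _ hn), if_pos hn]
        · rw [if_neg hn]
          by_cases hname : low.getD j "" = name
          · rw [if_pos (hiff.mpr hname)]
          · rw [if_neg (fun h => hname (hiff.mp h)), hyp j hj,
              if_neg (by
                intro h
                rcases List.mem_cons.mp h with h | h
                · exact hname h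
                · exact hn h)]
      · rw [show pvGroupB (PySem.Set.ofList low) cs (name, pvOcc low name 0) = cs from by
          rw [pvGroupB, if_neg hbig]]
        apply ih htail _ hl
        intro j hj
        rw [hyp j hj]
        by_cases hn : low.getD j "" ∈ ns
        · rw [if_pos hn, if_pos (List.mem_cons_of_mem _ hn)]
        · rw [if_neg hn]
          by_cases hname : low.getD j "" = name
          · rw [if_pos (by rw [hname]; exact List.mem_cons_self)]
            have hcount : low.count (low.getD j "") = 1 := by
              have h1 : low.getD j "" ∈ low := by
                rw [List.getD_eq_getElem low "" (by omega)]
                exact List.getElem_mem _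
              have h2 := List.count_pos_iff.mpr h1
              have h3 := pvOcc_length name low 0
              rw [hname] at h2 ⊢
              omega
            rw [pvOutAt, if_pos hcount]
          · rw [if_neg (by
              intro h
              rcases List.mem_cons.mp h with h | h
              · exact hname h
              · exact hn h)]

lemma pvAinv (cols low : List String) (hlen : low.length = cols.length)
    (d0 : PySem.Dict String Int)
    (hd0 : ∀ c, d0.get? c = if c ∈ low ∧ low.count c ≠ 1 then some ((low.count c : Int)) else none) :
    ∀ i, i ≤ cols.length →
    (((List.range i).foldl (pvStepA (PySem.Dict.counter low) low) (cols, d0)).1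
      = (List.range i).map (pvOutAt cols low) ++ cols.drop i)
    ∧ ∀ c : String, ((List.range i).foldl (pvStepA (PySem.Dict.counter low) low) (cols, d0)).2.get? c
      = if c ∈ low ∧ low.count c ≠ 1
        then some ((low.count c : Int) - ((low.take i).count c : Int))
        else none := by
  intro i
  induction i with
  | zero =>
      intro _
      refine ⟨by simp, fun c => ?_⟩
      simp only [List.range_zero, List.foldl_nil]
      rw [hd0 c]
      simp
  | succ i ih =>
      intro hsucc
      obtain ⟨h1, h2⟩ := ih (by omega)
      rw [List.range_succ, List.foldl_append, List.foldl_cons, List.foldl_nil]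
      have hi : i < cols.length := by omega
      have hilow : i < low.length := by omega
      have hcol : low.getD i "" ∈ low := by
        rw [List.getD_eq_getElem low "" hilow]
        exact List.getElem_mem _
      have hpre : ((List.range i).map (pvOutAt cols low)).length = i := by simp
      have htake : low.take (i+1) = low.take i ++ [low.getD i ""] := by
        rw [List.take_add_one, List.getElem?_eq_getElem hilow, List.getD_eq_getElem low "" hilow]
        rfl
      simp only [pvStepA, PySem.List.pyGetD_natCast]
      by_cases hdup : low.count (low.getD i "") = 1
      · have hcontains : ((List.range i).foldl (pvStepA (PySem.Dict.counter low) low) (cols, d0)).2.contains (low.getD i "") = false := by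
          rw [PySem.Dict.contains_eq_isSome_get?, h2, if_neg (fun h => h.2 hdup)]
          rfl
        rw [hcontains]
        simp only [Bool.false_eq_true, if_false]
        constructor
        · rw [h1, List.map_append, List.map_cons, List.map_nil]
          rw [List.append_assoc]
          congr 1
          rw [pvOutAt, if_pos hdup, List.drop_eq_getElem_cons hi,
            List.getD_eq_getElem cols "" hi]
          rfl
        · intro c
          rw [h2 c]
          by_cases hcl : c ∈ low ∧ low.count c ≠ 1
          · rw [if_pos hcl, if_pos hcl]
            have hne : ¬ (low.getD i "" == c) = true := by
              intro h
              exact hcl.2 (by rw [← eq_of_beq h]; exact hdup)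
            rw [htake, List.count_append, List.count_singleton, if_neg hne]
            simp
          · rw [if_neg hcl, if_neg hcl]
      · have hcontains : ((List.range i).foldl (pvStepA (PySem.Dict.counter low) low) (cols, d0)).2.contains (low.getD i "") = true := by
          rw [PySem.Dict.contains_eq_isSome_get?, h2, if_pos ⟨hcol, hdup⟩]
          rfl
        rw [hcontains]
        simp only [if_true]
        have hgd : ((List.range i).foldl (pvStepA (PySem.Dict.counter low) low) (cols, d0)).2.getD (low.getD i "") 0
            = (low.count (low.getD i "") : Int) - ((low.take i).count (low.getD i "") : Int) := by
          rw [PySem.Dict.getD, h2, if_pos ⟨hcol, hdup⟩, Option.getD_some]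
        have hidx : (PySem.Dict.counter low).getD (low.getD i "") 0
            - ((List.range i).foldl (pvStepA (PySem.Dict.counter low) low) (cols, d0)).2.getD (low.getD i "") 0
            = (((low.take i).count (low.getD i "") : Nat) : Int) := by
          rw [hgd, PySem.Dict.getD_counter]
          ring
        have hsize : (PySem.Dict.counter low).size + 1 = (PySem.Set.ofList low).length + 1 := by
          have hk : (PySem.Dict.counter low).keys.length = (PySem.Dict.counter low).size := by
            rw [PySem.Dict.keys, List.length_map, PySem.Dict.size]
          rw [← hk, PySem.Dict.keys_counter]
        rw [hidx, hsize, pvDupLoopA_eq low]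
        have hcand' : pvLoopL low ((PySem.Set.ofList low).length + 1)
            (low.getD i "" ++ "_" ++ PySem.Int.toStr ((((low.take i).count (low.getD i "") : Nat) : Int)))
            = pvCand low (low.getD i "") ((((low.take i).count (low.getD i "") : Nat) : Int)) := rfl
        obtain ⟨t, ht⟩ := pvLoopL_append low ((PySem.Set.ofList low).length + 1)
          (low.getD i "" ++ "_" ++ PySem.Int.toStr ((((low.take i).count (low.getD i "") : Nat) : Int)))
        have hcand : pvCand low (low.getD i "") ((((low.take i).count (low.getD i "") : Nat) : Int))
            = low.getD i "" ++ ("_" ++ PySem.Int.toStr ((((low.take i).count (low.getD i "") : Nat) : Int)) ++ t) := by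
          rw [pvCand, ht]
          simp [String.append_assoc]
        have hget1 : ((List.range i).foldl (pvStepA (PySem.Dict.counter low) low) (cols, d0)).1.getD i ""
            = cols.getD i "" := by
          rw [h1, List.getD_append_right _ _ _ _ (le_of_eq hpre), hpre,
            Nat.sub_self, List.getD_eq_getElem?_getD, List.getElem?_drop, Nat.add_zero,
            ← List.getD_eq_getElem?_getD]
        have hout : pvReplace1 (pvCand low (low.getD i "") ((((low.take i).count (low.getD i "") : Nat) : Int)))
              (low.getD i "") (cols.getD i "")
            = pvOutAt cols low i := by
          rw [hcand, pvReplace1_prefix, pvOutAt, if_neg hdup]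
          congr 1
          rw [pvTail, hcand, String.toList_append, List.drop_left, String.ofList_toList]
        constructor
        · rw [hcand', hget1, hout, PySem.List.pySetD_natCast, h1,
            List.set_append_right _ _ (le_of_eq hpre), hpre, Nat.sub_self,
            List.drop_eq_getElem_cons hi, List.set_cons_zero,
            List.map_append, List.map_cons, List.map_nil, List.append_assoc]
          rfl
        · intro c
          by_cases hc : c = low.getD i ""
          · subst hc
            rw [PySem.Dict.get?_insert_self, if_pos ⟨hcol, hdup⟩, hgd, htake,
              List.count_append, List.count_singleton, if_pos (by simp)]
            push_cast
            congr 1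
            ring
          · rw [PySem.Dict.get?_insert_of_ne _ _ hc, h2 c]
            by_cases hcl : c ∈ low ∧ low.count c ≠ 1
            · rw [if_pos hcl, if_pos hcl, htake, List.count_append, List.count_singleton,
                if_neg (fun h => hc (eq_of_beq h).symm)]
              norm_num
            · rw [if_neg hcl, if_neg hcl]

theorem dedupe_columns_eq_spec (cols : List String) : dedupe_columns cols = pvSpecL cols := by
  simp only [dedupe_columns, pvSpecL]
  have hlen : (cols.map PySem.Str.lower).length = cols.length := List.length_map ..
  have hd0 : ∀ c, ((PySem.Dict.counter (cols.map PySem.Str.lower)).keys.foldl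
      (fun d col => if (PySem.Dict.counter (cols.map PySem.Str.lower)).getD col 0 ≠ 1
        then d.insert col ((PySem.Dict.counter (cols.map PySem.Str.lower)).getD col 0) else d)
      PySem.Dict.empty).get? c
      = if c ∈ (cols.map PySem.Str.lower) ∧ (cols.map PySem.Str.lower).count c ≠ 1
        then some (((cols.map PySem.Str.lower).count c : Int)) else none := by
    intro c
    rw [pvFoldl_insert_if_get (fun col => (PySem.Dict.counter (cols.map PySem.Str.lower)).getD col 0)
      (fun col => (PySem.Dict.counter (cols.map PySem.Str.lower)).getD col 0 ≠ 1)
      (PySem.Dict.counter (cols.map PySem.Str.lower)).keys PySem.Dict.empty c]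
    rw [PySem.Dict.get?_empty]
    by_cases hcl : c ∈ (cols.map PySem.Str.lower) ∧ (cols.map PySem.Str.lower).count c ≠ 1
    · rw [if_pos hcl, if_pos ?_, PySem.Dict.getD_counter]
      refine ⟨?_, ?_⟩
      · rw [PySem.Dict.keys_counter]
        exact (PySem.Set.mem_ofList _ _).mpr hcl.1
      · rw [PySem.Dict.getD_counter]
        intro h
        exact hcl.2 (by exact_mod_cast h)
    · rw [if_neg hcl, if_neg ?_]
      rintro ⟨hmem, hne⟩
      apply hcl
      refine ⟨(PySem.Set.mem_ofList _ _).mp (by rw [← PySem.Dict.keys_counter]; exact hmem), ?_⟩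
      rw [PySem.Dict.getD_counter] at hne
      intro h
      exact hne (by exact_mod_cast h)
  obtain ⟨h1, _⟩ := pvAinv cols (cols.map PySem.Str.lower) hlen _ hd0 cols.length (le_refl _)
  rw [hlen, h1, List.drop_length, List.append_nil]

theorem dedupe_columns_alt_eq_spec (cols : List String) : dedupe_columns_alt cols = pvSpecL cols := by
  simp only [dedupe_columns_alt, pvSpecL]
  have hlen : (cols.map PySem.Str.lower).length = cols.length := List.length_map ..
  have hkeys : ((PySem.List.enumerate cols 0).foldl
      (fun d p => d.modify (PySem.Str.lower p.2) [] (fun l => l ++ [p.1])) PySem.Dict.empty).keys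
      = PySem.Set.ofList (cols.map PySem.Str.lower) := by
    rw [PySem.Dict.keys_foldl_modify_key (PySem.List.enumerate cols 0)
      (fun p => PySem.Str.lower p.2) [] (fun _ p => fun l => l ++ [p.1]) PySem.Dict.empty]
    have h1 : (PySem.List.enumerate cols 0).map (fun p => PySem.Str.lower p.2)
        = cols.map PySem.Str.lower := by
      rw [show (fun p : Int × String => PySem.Str.lower p.2)
          = PySem.Str.lower ∘ (fun p : Int × String => p.2) from rfl, ← List.map_map,
        PySem.List.map_snd_enumerate]
    rw [h1]
    exact PySem.Set.update_nil_left _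
  have hgetD : ∀ name, ((PySem.List.enumerate cols 0).foldl
      (fun d p => d.modify (PySem.Str.lower p.2) [] (fun l => l ++ [p.1])) PySem.Dict.empty).getD name []
      = pvOcc (cols.map PySem.Str.lower) name 0 := by
    intro name
    have hmf : (PySem.List.enumerate cols 0).foldl
        (fun d p => d.modify (PySem.Str.lower p.2) [] (fun l => l ++ [p.1])) PySem.Dict.empty
        = ((PySem.List.enumerate cols 0).map (fun p => (PySem.Str.lower p.2, p.1))).foldl
          (fun d q => d.modify q.1 [] (fun l => l ++ [q.2])) PySem.Dict.empty := by
      rw [List.foldl_map]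
    rw [hmf, PySem.Dict.getD_foldl_modify_append]
    have hempty : (PySem.Dict.empty : PySem.Dict String (List Int)).getD name [] = [] := rfl
    rw [hempty, List.nil_append, List.filter_map]
    have hcomp : ((fun q : String × Int => q.1 == name) ∘ (fun p : Int × String => (PySem.Str.lower p.2, p.1)))
        = fun p : Int × String => PySem.Str.lower p.2 == name := rfl
    rw [hcomp, List.map_map]
    have hcomp2 : ((fun q : String × Int => q.2) ∘ (fun p : Int × String => (PySem.Str.lower p.2, p.1)))
        = fun p : Int × String => p.1 := rfl
    rw [hcomp2]
    exact pvOcc_filter_enum name cols 0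
  have hitems : ((PySem.List.enumerate cols 0).foldl
      (fun d p => d.modify (PySem.Str.lower p.2) [] (fun l => l ++ [p.1])) PySem.Dict.empty).items
      = (PySem.Set.ofList (cols.map PySem.Str.lower)).map
          (fun k => (k, pvOcc (cols.map PySem.Str.lower) k 0)) := by
    rw [pvItems_eq _ (by rw [hkeys]; exact PySem.Set.nodup_ofList _), hkeys]
    exact List.map_congr_left (fun k _ => by rw [hgetD k])
  rw [hitems, hkeys, PySem.Set.ofList_ofList, List.foldl_map]
  obtain ⟨hlen2, hget⟩ := pvBouter cols (cols.map PySem.Str.lower) hlen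
    (PySem.Set.ofList (cols.map PySem.Str.lower)) (PySem.Set.nodup_ofList _) cols rfl
    (by
      intro j hj
      rw [if_pos ?_]
      apply (PySem.Set.mem_ofList _ _).mpr
      rw [List.getD_eq_getElem _ "" (by omega)]
      exact List.getElem_mem _)
  apply List.ext_getElem (by rw [hlen2]; simp)
  intro i h1 h2
  rw [List.getElem_map, List.getElem_range, ← List.getD_eq_getElem _ "" h1]
  exact hget i (by omega)

-- ===== VERDICT (by name: the statement is the Claim_ definition above) =====
theorem dedupe_columns_spec : Claim_equal_dedupe_columns := by
  intro cols _
  unfold Spec_dedupe_columns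
  rw [dedupe_columns_eq_spec, dedupe_columns_alt_eq_spec]
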